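-- pv_equiv track=rewrite | github.com/naturalstupid/PyJHora | src/jhora/horoscope/dhasa/graha/panchottari.py | _antardhasa
-- ===== SOURCE A (Python) =====
-- dhasa_adhipathi_list = {0:12,3:13,6:14,2:15,5:16,1:17,4:18} #  Total 105 years
--
-- def _next_adhipati(lord,dirn=1):
--     """Returns next lord after `lord` in the adhipati_list"""
--     current = list(dhasa_adhipathi_list.keys()).index(lord)
--     next_lord = list(dhasa_adhipathi_list.keys())[((current + dirn) % len(dhasa_adhipathi_list))]
--     return next_lord
--
-- def _antardhasa(dhasa_lord,antardhasa_option=1):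
--     lord = dhasa_lord
--     if antardhasa_option in [3,4]:
--         lord = _next_adhipati(dhasa_lord, dirn=1)
--     elif antardhasa_option in [5,6]:
--         lord = _next_adhipati(dhasa_lord, dirn=-1)
--     dirn = 1 if antardhasa_option in [1,3,5] else -1
--     _bhukthis = []
--     for _ in range(len(dhasa_adhipathi_list)):
--         _bhukthis.append(lord)
--         lord = _next_adhipati(lord,dirn)
--     return _bhukthis
-- ===== SOURCE B (Python) =====
-- dhasa_adhipathi_list = {0:12,3:13,6:14,2:15,5:16,1:17,4:18} #  Total 105 years
--
-- def _antardhasa(dhasa_lord, antardhasa_option=1):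
--     order = list(dhasa_adhipathi_list.keys())
--     n = len(order)
--     s = order.index(dhasa_lord)
--     if antardhasa_option in (3, 4):
--         s = (s + 1) % n
--     elif antardhasa_option in (5, 6):
--         s = (s - 1) % n
--     if antardhasa_option in (1, 3, 5):
--         return order[s:] + order[:s]
--     rev = order[::-1]
--     t = (n - 1 - s) % n
--     return rev[t:] + rev[:t]
-- ===== Notes on version B (the rewrite author's own statement) =====
-- stated objective: simpler
-- what changed: B replaces A's loop of 7 _next_adhipati calls (each rescanning the key list with .index) by one index lookup plus a closed-form slice rotation of the key list (reversed for the backward direction).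
import Mathlib
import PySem

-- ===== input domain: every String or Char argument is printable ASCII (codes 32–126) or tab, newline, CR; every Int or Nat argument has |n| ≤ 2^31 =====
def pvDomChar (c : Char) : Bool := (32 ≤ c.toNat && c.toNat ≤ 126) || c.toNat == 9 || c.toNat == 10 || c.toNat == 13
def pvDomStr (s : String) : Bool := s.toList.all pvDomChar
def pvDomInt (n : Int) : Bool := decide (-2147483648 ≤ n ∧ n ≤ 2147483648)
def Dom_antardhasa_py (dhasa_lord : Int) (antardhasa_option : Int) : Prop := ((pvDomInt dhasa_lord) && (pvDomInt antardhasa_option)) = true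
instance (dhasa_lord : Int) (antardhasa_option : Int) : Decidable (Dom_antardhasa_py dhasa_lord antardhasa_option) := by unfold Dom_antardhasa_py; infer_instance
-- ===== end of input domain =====

-- B replaces A's 7 repeated _next_adhipati walks (each an O(n) list.index scan) by one index
-- lookup and a closed-form slice rotation of the key list; return value equivalence only.

-- ===== PORT A =====
-- list(dhasa_adhipathi_list.keys())
def pvKeysA : List Int := [0, 3, 6, 2, 5, 1, 4]

-- _next_adhipati: list.index raises ValueError when lord is absent → none (excluded by Pre_)
def pvNextAdhipati (lord : Int) (dirn : Int) : Option Int :=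
  match PySem.List.index? pvKeysA lord with
  | none => none
  | some current => PySem.List.pyGet? pvKeysA (PySem.Int.mod ((current : Int) + dirn) 7)

-- the 'for _ in range(len(dhasa_adhipathi_list))' loop: append lord, then lord = _next_adhipati(lord, dirn)
def pvAntLoopA : Nat → Int → Int → List Int → Option (List Int)
  | 0, _, _, acc => some acc
  | n + 1, lord, dirn, acc =>
    match pvNextAdhipati lord dirn with
    | none => none
    | some nl => pvAntLoopA n nl dirn (acc ++ [lord])

def antardhasa_py (dhasa_lord : Int) (antardhasa_option : Int) : List Int :=
  let lordOpt : Option Int :=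
    if antardhasa_option = 3 ∨ antardhasa_option = 4 then pvNextAdhipati dhasa_lord 1
    else if antardhasa_option = 5 ∨ antardhasa_option = 6 then pvNextAdhipati dhasa_lord (-1)
    else some dhasa_lord
  let dirn : Int :=
    if antardhasa_option = 1 ∨ antardhasa_option = 3 ∨ antardhasa_option = 5 then 1 else -1
  match lordOpt with
  | none => []        -- unreachable under Pre_ (Python raises ValueError)
  | some l => (pvAntLoopA 7 l dirn []).getD []   -- getD unreachable under Pre_

-- ===== PORT B =====
def pvKeysB : List Int := [0, 3, 6, 2, 5, 1, 4]

def antardhasa_py_alt (dhasa_lord : Int) (antardhasa_option : Int) : List Int :=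
  match PySem.List.index? pvKeysB dhasa_lord with
  | none => []        -- order.index raises ValueError (excluded by Pre_)
  | some s0 =>
    let n : Int := 7
    let s : Int :=
      if antardhasa_option = 3 ∨ antardhasa_option = 4 then PySem.Int.mod ((s0 : Int) + 1) n
      else if antardhasa_option = 5 ∨ antardhasa_option = 6 then PySem.Int.mod ((s0 : Int) - 1) n
      else (s0 : Int)
    if antardhasa_option = 1 ∨ antardhasa_option = 3 ∨ antardhasa_option = 5 then
      PySem.List.slice pvKeysB (some s) none ++ PySem.List.slice pvKeysB none (some s)
    else
      let rev := pvKeysB.reverse  -- order[::-1]  (PySem.List.slice?_none_none_neg_one)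
      let t : Int := PySem.Int.mod (n - 1 - s) n
      PySem.List.slice rev (some t) none ++ PySem.List.slice rev none (some t)

-- ===== PRECONDITION & SPEC =====
-- Pre_ excludes lords absent from dhasa_adhipathi_list, on which A's list.index raises ValueError.
def Pre_antardhasa_py (dhasa_lord : Int) (antardhasa_option : Int) : Prop :=
  dhasa_lord ∈ ([0, 3, 6, 2, 5, 1, 4] : List Int)
instance (dhasa_lord : Int) (antardhasa_option : Int) : Decidable (Pre_antardhasa_py dhasa_lord antardhasa_option) := by unfold Pre_antardhasa_py; infer_instance

def pvWitness_antardhasa_py : Int × Int := (6, 4)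

def Spec_antardhasa_py (dhasa_lord : Int) (antardhasa_option : Int) (out : List Int) : Prop := out = antardhasa_py_alt dhasa_lord antardhasa_option
instance (dhasa_lord : Int) (antardhasa_option : Int) (out : List Int) : Decidable (Spec_antardhasa_py dhasa_lord antardhasa_option out) := by unfold Spec_antardhasa_py; infer_instance

-- ===== CLAIM (what is proved, stated in full; the proofs are below) =====
def Claim_equal_antardhasa_py : Prop := ∀ (dhasa_lord : Int) (antardhasa_option : Int), Dom_antardhasa_py dhasa_lord antardhasa_option → Pre_antardhasa_py dhasa_lord antardhasa_option → Spec_antardhasa_py dhasa_lord antardhasa_option (antardhasa_py dhasa_lord antardhasa_option)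

-- ===== LEMMAS AND PROOFS =====
-- For a fixed lord, both sides depend on the option only through the three decidable tests; case
-- on the five special option values, then everything is a closed computation.
theorem pv_case (dhasa_lord : Int) (antardhasa_option : Int)
    (hpre : Pre_antardhasa_py dhasa_lord antardhasa_option) :
    antardhasa_py dhasa_lord antardhasa_option = antardhasa_py_alt dhasa_lord antardhasa_option := by
  unfold Pre_antardhasa_py at hpre
  by_cases h1 : antardhasa_option = 1 <;>
  by_cases h3 : antardhasa_option = 3 <;>
  by_cases h4 : antardhasa_option = 4 <;>
  by_cases h5 : antardhasa_option = 5 <;>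
  by_cases h6 : antardhasa_option = 6 <;>
    simp only [List.mem_cons, List.not_mem_nil, or_false] at hpre <;>
    rcases hpre with rfl | rfl | rfl | rfl | rfl | rfl | rfl <;>
    simp [antardhasa_py, antardhasa_py_alt, h1, h3, h4, h5, h6] <;>
    decide

-- ===== VERDICT (by name: the statement is the Claim_ definition above) =====
theorem antardhasa_py_spec : Claim_equal_antardhasa_py := by
  intro dhasa_lord antardhasa_option _ hpre
  exact pv_case dhasa_lord antardhasa_option hpre
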